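-- pv_equiv track=rewrite | github.com/echoprotocol/pytests | test_runner.py | process_filters
-- ===== SOURCE A (Python) =====
-- types = [
--     # TEST TYPES
--     "main",
--     "positive",
--     "negative"
-- ]
--
-- def process_filters(filters):
--     category_filters = []
--     type_filters = []
--     for pytests_filter in filters:
--         filter_negation = not pytests_filter.startswith("^")
--         if not filter_negation:
--             pytests_filter = pytests_filter[1:]
--         if pytests_filter in types:
--             type_filters.append([pytests_filter, filter_negation])
--         else:
--             category_filters.append([pytests_filter, filter_negation])
--
--     command = ""
--     if len(category_filters):
--         command = "{}-a ".format(command)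
--         for category_filter in category_filters:
--             if category_filter[1]:
--                 command = "{}{} ".format(command, category_filter[0])
--             else:
--                 command = "{}^{} ".format(command, category_filter[0])
--
--     if len(type_filters):
--         command = "{}-m ".format(command)
--         for type_filter in type_filters:
--             if type_filter[1]:
--                 command = "{}{}:type ".format(command, type_filter[0])
--             else:
--                 command = "{}^{}:type ".format(command, type_filter[0])
--
--     return command
-- ===== SOURCE B (Python) =====
-- types = [
--     # TEST TYPES
--     "main",
--     "positive",
--     "negative"
-- ]
--
-- def process_filters(filters):
--     # Build the two command sections back-to-front by direct string prepends:
--     # no intermediate token lists, no partition pairs, no joins.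
--     a_section = ""
--     m_section = ""
--     for f in reversed(filters):
--         negated = f.startswith("^")
--         name = f[1:] if negated else f
--         token = ("^" if negated else "") + name
--         if name in types:
--             m_section = token + ":type " + m_section
--         else:
--             a_section = token + " " + a_section
--     command = ""
--     if a_section:
--         command = "-a " + a_section
--     if m_section:
--         command += "-m " + m_section
--     return command
-- ===== Notes on version B (the rewrite author's own statement) =====
-- stated objective: alternative
-- what changed: B traverses the filters once in reverse and builds the '-a' and '-m' sections directly as strings by prepending each formatted token, with no intermediate partition lists and no second rebuild loops; A partitions into [name, flag] pair lists and then re-walks each list appending to the command.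
import Mathlib
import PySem

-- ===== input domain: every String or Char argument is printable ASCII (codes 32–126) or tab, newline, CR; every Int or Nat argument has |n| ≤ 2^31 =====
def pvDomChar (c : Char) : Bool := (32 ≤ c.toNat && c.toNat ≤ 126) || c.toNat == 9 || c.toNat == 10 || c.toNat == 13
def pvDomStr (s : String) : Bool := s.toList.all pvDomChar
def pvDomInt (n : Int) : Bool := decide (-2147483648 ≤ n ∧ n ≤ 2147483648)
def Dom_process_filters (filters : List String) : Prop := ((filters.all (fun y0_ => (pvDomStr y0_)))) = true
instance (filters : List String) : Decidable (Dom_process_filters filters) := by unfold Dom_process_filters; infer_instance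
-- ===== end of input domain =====

-- B builds the '-a'/'-m' sections back-to-front in one reversed pass by prepending each formatted
-- token directly, with no intermediate partition lists and no rebuild loops (alternative decomposition, not claimed faster).


-- module constant `types` shared by both programs
def pvTypes : List String := ["main", "positive", "negative"]

-- ===== PORT A =====
-- body of A's partitioning for-loop (one iteration)
def pvAstep (acc : List (String × Bool) × List (String × Bool)) (f : String) :
    List (String × Bool) × List (String × Bool) :=
  let filter_negation := !(PySem.Str.startswith f "^")
  let f' := if !filter_negation then PySem.Str.slice f (some 1) none else f
  if f' ∈ pvTypes then (acc.1, acc.2 ++ [(f', filter_negation)])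
  else (acc.1 ++ [(f', filter_negation)], acc.2)

def process_filters (filters : List String) : String :=
  let p := filters.foldl pvAstep ([], [])
  let command : String := ""
  let command := if p.1.length ≠ 0 then
      p.1.foldl (fun c q => if q.2 then c ++ q.1 ++ " " else c ++ "^" ++ q.1 ++ " ")
        (command ++ "-a ")
    else command
  if p.2.length ≠ 0 then
      p.2.foldl (fun c q => if q.2 then c ++ q.1 ++ ":type " else c ++ "^" ++ q.1 ++ ":type ")
        (command ++ "-m ")
  else command

-- ===== PORT B =====
-- body of B's reversed loop (one iteration): prepend the formatted token to its section string
def pvBstep (acc : String × String) (f : String) : String × String :=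
  let negated := PySem.Str.startswith f "^"
  let name := if negated then PySem.Str.slice f (some 1) none else f
  let token := (if negated then "^" else "") ++ name
  if name ∈ pvTypes then (acc.1, token ++ ":type " ++ acc.2)
  else (token ++ " " ++ acc.1, acc.2)

def process_filters_alt (filters : List String) : String :=
  let p := filters.reverse.foldl pvBstep ("", "")
  let command : String := if p.1 ≠ "" then "-a " ++ p.1 else ""
  if p.2 ≠ "" then command ++ "-m " ++ p.2 else command

-- ===== PRECONDITION & SPEC =====
def Spec_process_filters (filters : List String) (out : String) : Prop := out = process_filters_alt filters
instance (filters : List String) (out : String) : Decidable (Spec_process_filters filters out) := by unfold Spec_process_filters; infer_instance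

-- ===== CLAIM (what is proved, stated in full; the proofs are below) =====
def Claim_equal_process_filters : Prop := ∀ (filters : List String), Dom_process_filters filters → Spec_process_filters filters (process_filters filters)

-- ===== LEMMAS AND PROOFS =====

-- the stripped name both programs test against `types`
def pvCond (f : String) : String :=
  if PySem.Str.startswith f "^" then PySem.Str.slice f (some 1) none else f

-- recursive characterisations of A's two pair lists
def pvCat : List String → List (String × Bool)
  | [] => []
  | f :: fs =>
    if pvCond f ∈ pvTypes then pvCat fs
    else (pvCond f, !PySem.Str.startswith f "^") :: pvCat fs

def pvTyp : List String → List (String × Bool)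
  | [] => []
  | f :: fs =>
    if pvCond f ∈ pvTypes then (pvCond f, !PySem.Str.startswith f "^") :: pvTyp fs
    else pvTyp fs

-- the section strings those pair lists format to
def pvFmt (q : String × Bool) : String := (if q.2 then "" else "^") ++ q.1

def pvCatStr : List (String × Bool) → String
  | [] => ""
  | q :: l => pvFmt q ++ " " ++ pvCatStr l

def pvTypStr : List (String × Bool) → String
  | [] => ""
  | q :: l => pvFmt q ++ ":type " ++ pvTypStr l

-- A's partitioning fold computes pvCat/pvTyp
theorem pvAstep_eq (acc : List (String × Bool) × List (String × Bool)) (f : String) :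
    pvAstep acc f =
      if pvCond f ∈ pvTypes then (acc.1, acc.2 ++ [(pvCond f, !PySem.Str.startswith f "^")])
      else (acc.1 ++ [(pvCond f, !PySem.Str.startswith f "^")], acc.2) := by
  unfold pvAstep pvCond
  simp only [Bool.not_not]

theorem pvA_fold (fs : List String) (acc : List (String × Bool) × List (String × Bool)) :
    fs.foldl pvAstep acc = (acc.1 ++ pvCat fs, acc.2 ++ pvTyp fs) := by
  induction fs generalizing acc with
  | nil => simp [pvCat, pvTyp]
  | cons f fs ih =>
    rw [List.foldl_cons, pvAstep_eq]
    by_cases hm : pvCond f ∈ pvTypes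
    · rw [if_pos hm, ih]
      simp [pvCat, pvTyp, hm]
    · rw [if_neg hm, ih]
      simp [pvCat, pvTyp, hm]

theorem pvBstep_eq (acc : String × String) (f : String) :
    pvBstep acc f =
      if pvCond f ∈ pvTypes then (acc.1, pvFmt (pvCond f, !PySem.Str.startswith f "^") ++ ":type " ++ acc.2)
      else (pvFmt (pvCond f, !PySem.Str.startswith f "^") ++ " " ++ acc.1, acc.2) := by
  unfold pvBstep pvCond pvFmt
  cases hsw : PySem.Str.startswith f "^"
  · simp [hsw]
  · simp [hsw]

-- B's reversed fold computes the formatted section strings of pvCat/pvTyp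
theorem pvB_fold (fs : List String) :
    fs.reverse.foldl pvBstep ("", "") = (pvCatStr (pvCat fs), pvTypStr (pvTyp fs)) := by
  rw [List.foldl_reverse]
  induction fs with
  | nil => rfl
  | cons f fs ih =>
    rw [List.foldr_cons, ih]
    rw [pvBstep_eq]
    by_cases hm : pvCond f ∈ pvTypes
    · rw [if_pos hm]
      simp [pvCat, pvTyp, pvTypStr, hm]
    · rw [if_neg hm]
      simp [pvCat, pvTyp, pvCatStr, hm]

-- A's two rebuild loops append the same formatted section strings
theorem pvFoldA_cat (l : List (String × Bool)) (pre : String) :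
    l.foldl (fun c q => if q.2 then c ++ q.1 ++ " " else c ++ "^" ++ q.1 ++ " ") pre
      = pre ++ pvCatStr l := by
  induction l generalizing pre with
  | nil => simp [pvCatStr]
  | cons q l ih =>
    rw [List.foldl_cons, ih]
    cases q with
    | mk s b => cases b <;> (apply String.ext; simp [pvCatStr, pvFmt])

theorem pvFoldA_typ (l : List (String × Bool)) (pre : String) :
    l.foldl (fun c q => if q.2 then c ++ q.1 ++ ":type " else c ++ "^" ++ q.1 ++ ":type ") pre
      = pre ++ pvTypStr l := by
  induction l generalizing pre with
  | nil => simp [pvTypStr]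
  | cons q l ih =>
    rw [List.foldl_cons, ih]
    cases q with
    | mk s b => cases b <;> (apply String.ext; simp [pvTypStr, pvFmt])

-- the section string is empty exactly when the pair list is
theorem pvCatStr_eq_empty (l : List (String × Bool)) : pvCatStr l = "" ↔ l = [] := by
  cases l with
  | nil => simp [pvCatStr]
  | cons q l =>
    simp only [pvCatStr]
    constructor
    · intro h
      have := congrArg String.toList h
      simp at this
    · intro h; exact absurd h (by simp)

theorem pvTypStr_eq_empty (l : List (String × Bool)) : pvTypStr l = "" ↔ l = [] := by
  cases l with
  | nil => simp [pvTypStr]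
  | cons q l =>
    simp only [pvTypStr]
    constructor
    · intro h
      have := congrArg String.toList h
      simp at this
    · intro h; exact absurd h (by simp)

-- ===== VERDICT (by name: the statement is the Claim_ definition above) =====
theorem process_filters_spec : Claim_equal_process_filters := by
  intro filters _
  unfold Spec_process_filters process_filters process_filters_alt
  rw [pvA_fold, pvB_fold]
  simp only [List.nil_append]
  rcases hc : pvCat filters with _ | ⟨c0, cs⟩ <;> rcases ht : pvTyp filters with _ | ⟨t0, ts⟩ <;>
    simp [pvFoldA_cat, pvFoldA_typ, pvCatStr_eq_empty, pvTypStr_eq_empty] <;>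
    (apply String.ext; simp only [pvCatStr, pvTypStr, pvFmt]; split_ifs <;> simp)
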